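-- pv_equiv track=rewrite | github.com/eliottcassidy2000/math | 04-computation/large_n_exploration.py | doubly_regular
-- ===== SOURCE A (Python) =====
-- def doubly_regular(n, QR_set):
--     """Build doubly-regular tournament from a set of quadratic residues."""
--     adj = [[0]*n for _ in range(n)]
--     for i in range(n):
--         for d in QR_set:
--             j = (i + d) % n
--             if j != i:
--                 adj[i][j] = 1
--     return adj
-- ===== SOURCE B (Python) =====
-- def doubly_regular(n, QR_set):
--     """Build doubly-regular tournament from a set of quadratic residues."""
--     if n <= 0:
--         return []
--     R = {d % n for d in QR_set}
--     return [[1 if j != i and (j - i) % n in R else 0 for j in range(n)]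
--             for i in range(n)]
-- ===== Notes on version B (the rewrite author's own statement) =====
-- stated objective: idiomatic
-- what changed: Replaces A's scatter-writes at offsets (i+d)%n into a mutable zero matrix by a gather: reduce QR_set to residues mod n once, then build each cell (i,j) directly as a nested comprehension testing (j-i)%n membership.
import Mathlib
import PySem

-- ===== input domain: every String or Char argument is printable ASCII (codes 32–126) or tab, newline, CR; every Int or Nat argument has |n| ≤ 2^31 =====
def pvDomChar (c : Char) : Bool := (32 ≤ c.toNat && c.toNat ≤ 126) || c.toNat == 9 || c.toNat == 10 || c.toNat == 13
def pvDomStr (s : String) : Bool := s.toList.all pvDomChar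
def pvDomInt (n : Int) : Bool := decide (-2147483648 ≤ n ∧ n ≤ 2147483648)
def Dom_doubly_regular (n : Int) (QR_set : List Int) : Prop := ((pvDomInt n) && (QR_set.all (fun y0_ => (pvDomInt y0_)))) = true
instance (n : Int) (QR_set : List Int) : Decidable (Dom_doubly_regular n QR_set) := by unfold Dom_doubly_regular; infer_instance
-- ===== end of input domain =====

-- B replaces A's scatter-writes at offsets (i+d)%n into a zero matrix by a gather:
-- reduce QR_set mod n once, then build each cell (i,j) directly from a membership test (idiomatic; equal cost).

-- ===== PORT A =====
-- adj = [[0]*n for _ in range(n)]; nested loops scatter adj[i][(i+d)%n] = 1 (i in range, so .toNat is exact).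
def doubly_regular (n : Int) (QR_set : List Int) : List (List Int) :=
  let adj := (PySem.List.pyRange 0 n 1).map (fun _ => List.replicate n.toNat 0)
  (PySem.List.pyRange 0 n 1).foldl (fun adj i =>
    QR_set.foldl (fun adj d =>
      let j := PySem.Int.mod (i + d) n
      if j ≠ i then adj.modify i.toNat (fun row => PySem.List.pySetD row j 1) else adj) adj) adj

-- ===== PORT B =====
-- early return [] for n <= 0; R = {d % n for d in QR_set}; nested comprehension gathers each cell.
def doubly_regular_alt (n : Int) (QR_set : List Int) : List (List Int) :=
  if n ≤ 0 then []
  else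
    let R := PySem.Set.ofList (QR_set.map (fun d => PySem.Int.mod d n))
    (PySem.List.pyRange 0 n 1).map (fun i =>
      (PySem.List.pyRange 0 n 1).map (fun j =>
        if j ≠ i ∧ PySem.Int.mod (j - i) n ∈ R then 1 else 0))

-- ===== PRECONDITION & SPEC =====
def Spec_doubly_regular (n : Int) (QR_set : List Int) (out : List (List Int)) : Prop := out = doubly_regular_alt n QR_set
instance (n : Int) (QR_set : List Int) (out : List (List Int)) : Decidable (Spec_doubly_regular n QR_set out) := by unfold Spec_doubly_regular; infer_instance

-- ===== CLAIM (what is proved, stated in full; the proofs are below) =====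
def Claim_equal_doubly_regular : Prop := ∀ (n : Int) (QR_set : List Int), Dom_doubly_regular n QR_set → Spec_doubly_regular n QR_set (doubly_regular n QR_set)

-- ===== LEMMAS AND PROOFS =====

-- modular arithmetic: scatter target (i+d)%n hits column j  ↔  gather residue (j-i)%n equals d%n
theorem pv_mod_equiv (n i d j : Int) (hn : 0 < n) (hj : 0 ≤ j) (hjn : j < n) :
    (PySem.Int.mod (i + d) n = j ∧ j ≠ i) ↔ (j ≠ i ∧ PySem.Int.mod (j - i) n = PySem.Int.mod d n) := by
  rw [PySem.Int.mod_eq_emod_of_pos hn, PySem.Int.mod_eq_emod_of_pos hn, PySem.Int.mod_eq_emod_of_pos hn]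
  have hjj : j % n = j := Int.emod_eq_of_lt hj hjn
  constructor
  · rintro ⟨h, hne⟩
    refine ⟨hne, ?_⟩
    have h1 : (i + d) ≡ j [ZMOD n] := by unfold Int.ModEq; rw [h, hjj]
    have h2 : (i + d) - i ≡ j - i [ZMOD n] := h1.sub_right i
    have h3 : d ≡ j - i [ZMOD n] := by simpa using h2
    exact h3.symm
  · rintro ⟨hne, h⟩
    refine ⟨?_, hne⟩
    have h1 : j - i ≡ d [ZMOD n] := h
    have h2 : (j - i) + i ≡ d + i [ZMOD n] := h1.add_right i
    have h3 : i + d ≡ j [ZMOD n] := by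
      have : j ≡ i + d [ZMOD n] := by simpa [add_comm] using h2
      exact this.symm
    calc (i + d) % n = j % n := h3
      _ = j := hjj

-- the inner loop over QR_set on a single row, characterised cell-by-cell
theorem pv_rowFold_getElem? (n i : Int) (hn : 0 < n) (ds : List Int) (row : List Int)
    (hlen : row.length = n.toNat) (k : Nat) :
    (ds.foldl (fun r d =>
        let j := PySem.Int.mod (i + d) n
        if j ≠ i then PySem.List.pySetD r j 1 else r) row)[k]? =
      if ∃ d ∈ ds, PySem.Int.mod (i + d) n = (k : Int) ∧ (k : Int) ≠ i then some 1 else row[k]? := by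
  induction ds generalizing row with
  | nil => simp
  | cons d ds ih =>
    simp only [List.foldl_cons]
    have hstep_len : (if PySem.Int.mod (i + d) n ≠ i then PySem.List.pySetD row (PySem.Int.mod (i + d) n) 1 else row).length = n.toNat := by
      split <;> simp [PySem.List.length_pySetD, hlen]
    rw [ih _ hstep_len]
    by_cases hP : ∃ e ∈ ds, PySem.Int.mod (i + e) n = (k : Int) ∧ (k : Int) ≠ i
    · have hP' : ∃ e ∈ d :: ds, PySem.Int.mod (i + e) n = (k : Int) ∧ (k : Int) ≠ i := by
        obtain ⟨e, he, h⟩ := hP; exact ⟨e, List.mem_cons_of_mem _ he, h⟩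
      simp [hP]
    · rw [if_neg hP]
      have hmnn : 0 ≤ PySem.Int.mod (i + d) n := PySem.Int.mod_nonneg _ hn
      have hmlt : PySem.Int.mod (i + d) n < n := PySem.Int.mod_lt _ hn
      by_cases hd : PySem.Int.mod (i + d) n = (k : Int) ∧ (k : Int) ≠ i
      · have hcons : ∃ e ∈ d :: ds, PySem.Int.mod (i + e) n = (k : Int) ∧ (k : Int) ≠ i :=
          ⟨d, List.mem_cons_self, hd⟩
        rw [if_pos hcons]
        have hne : PySem.Int.mod (i + d) n ≠ i := hd.1 ▸ hd.2
        rw [if_pos hne, PySem.List.pySetD_of_nonneg _ _ hmnn, List.getElem?_set]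
        have htn : (PySem.Int.mod (i + d) n).toNat = k := by omega
        have hklen : k < row.length := by omega
        simp [htn, hklen]
      · have hcons : ¬ ∃ e ∈ d :: ds, PySem.Int.mod (i + e) n = (k : Int) ∧ (k : Int) ≠ i := by
          rintro ⟨e, he, h⟩
          rcases List.mem_cons.mp he with rfl | he'
          · exact hd h
          · exact hP ⟨e, he', h⟩
        rw [if_neg hcons]
        split
        · next hne =>
          rw [PySem.List.pySetD_of_nonneg _ _ hmnn, List.getElem?_set]
          have : ¬ (PySem.Int.mod (i + d) n).toNat = k := by
            intro h
            apply hd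
            constructor
            · omega
            · intro hki; apply hne; omega
          simp [this]
        · rfl

-- the inner loop at matrix level is a single modify of row i by the row-level fold
theorem pv_innerFold_eq_modify (n i : Int) (_hi : 0 ≤ i) (ds : List Int) (adj : List (List Int)) :
    (ds.foldl (fun a d =>
        let j := PySem.Int.mod (i + d) n
        if j ≠ i then a.modify i.toNat (fun row => PySem.List.pySetD row j 1) else a) adj) =
      adj.modify i.toNat (fun row => ds.foldl (fun r d =>
        let j := PySem.Int.mod (i + d) n
        if j ≠ i then PySem.List.pySetD r j 1 else r) row) := by
  induction ds generalizing adj with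
  | nil => exact (List.modify_id _ _).symm
  | cons d ds ih =>
    simp only [List.foldl_cons]
    rw [ih]
    split
    · rw [List.modify_modify_eq]
      rfl
    · rfl

-- the outer scatter fold, characterised row-by-row (indices distinct and nonnegative)
theorem pv_outerFold_getElem? (g : Int → List Int → List Int) (is : List Int)
    (hnd : is.Nodup) (hpos : ∀ x ∈ is, 0 ≤ x) (adj : List (List Int)) (k : Nat) :
    (is.foldl (fun a i => a.modify i.toNat (g i)) adj)[k]? =
      if (k : Int) ∈ is then adj[k]?.map (g (k : Int)) else adj[k]? := by
  induction is generalizing adj with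
  | nil => simp
  | cons i is ih =>
    simp only [List.foldl_cons]
    rw [ih hnd.of_cons (fun x hx => hpos x (List.mem_cons_of_mem _ hx))]
    have hi : 0 ≤ i := hpos i List.mem_cons_self
    by_cases hmem : (k : Int) ∈ is
    · have hik : i ≠ (k : Int) := by
        intro h; exact (List.nodup_cons.mp hnd).1 (h ▸ hmem)
      have hik' : i.toNat ≠ k := by omega
      rw [if_pos hmem, if_pos (List.mem_cons_of_mem _ hmem)]
      rw [List.getElem?_modify]
      cases adj[k]? <;> simp [hik']
    · rw [if_neg hmem]
      by_cases hk : (k : Int) = i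
      · rw [if_pos (by rw [hk]; exact List.mem_cons_self)]
        rw [List.getElem?_modify]
        have : i.toNat = k := by omega
        cases adj[k]? <;> simp [this, hk]
      · have : ¬ (k : Int) ∈ i :: is := by
          intro h; rcases List.mem_cons.mp h with h | h
          · exact hk h
          · exact hmem h
        rw [if_neg this, List.getElem?_modify]
        have : i.toNat ≠ k := by omega
        cases adj[k]? <;> simp [this]

-- per-cell condition: some scatter offset hits column k  ↔  k ≠ i and (k-i)%n is a reduced residue
theorem pv_cond_equiv (n i k : Int) (hn : 0 < n) (hk0 : 0 ≤ k) (hkn : k < n) (QR_set : List Int) :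
    (∃ d ∈ QR_set, PySem.Int.mod (i + d) n = k ∧ k ≠ i) ↔
      (k ≠ i ∧ PySem.Int.mod (k - i) n ∈ PySem.Set.ofList (QR_set.map (fun d => PySem.Int.mod d n))) := by
  rw [PySem.Set.mem_ofList, List.mem_map]
  constructor
  · rintro ⟨d, hd, h⟩
    obtain ⟨hne, hm⟩ := (pv_mod_equiv n i d k hn hk0 hkn).mp h
    exact ⟨hne, d, hd, hm.symm⟩
  · rintro ⟨hne, d, hd, hm⟩
    exact ⟨d, hd, (pv_mod_equiv n i d k hn hk0 hkn).mpr ⟨hne, hm.symm⟩⟩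

-- one full row of A equals one full row of B
theorem pv_row_eq (n i : Int) (hn : 0 < n) (QR_set : List Int) :
    (QR_set.foldl (fun r d =>
        let j := PySem.Int.mod (i + d) n
        if j ≠ i then PySem.List.pySetD r j 1 else r) (List.replicate n.toNat 0)) =
      (PySem.List.pyRange 0 n 1).map (fun j =>
        if j ≠ i ∧ PySem.Int.mod (j - i) n ∈ PySem.Set.ofList (QR_set.map (fun d => PySem.Int.mod d n)) then (1 : Int) else 0) := by
  apply List.ext_getElem?
  intro k
  rw [pv_rowFold_getElem? n i hn QR_set _ (by simp) k]
  rw [List.getElem?_map, PySem.List.getElem?_pyRange_one]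
  by_cases hk : k < (n - 0).toNat
  · rw [if_pos hk]
    have hkn : (k : Int) < n := by omega
    have hcond := pv_cond_equiv n i (k : Int) hn (by positivity) hkn QR_set
    by_cases hc : ∃ d ∈ QR_set, PySem.Int.mod (i + d) n = (k : Int) ∧ (k : Int) ≠ i
    · rw [if_pos hc]
      have := hcond.mp hc
      simp only [Option.map_some, zero_add]
      rw [if_pos this]
    · rw [if_neg hc]
      have := hcond.not.mp hc
      simp only [Option.map_some, zero_add]
      rw [if_neg this]
      have hk' : k < n.toNat := by omega
      simp [hk']
  · rw [if_neg hk]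
    have : ¬ ∃ d ∈ QR_set, PySem.Int.mod (i + d) n = (k : Int) ∧ (k : Int) ≠ i := by
      rintro ⟨d, hd, hmod, hne⟩
      have := PySem.Int.mod_lt (i + d) hn
      omega
    rw [if_neg this]
    have hk' : ¬ k < n.toNat := by omega
    simp [hk']

-- ===== VERDICT (by name: the statement is the Claim_ definition above) =====
theorem doubly_regular_spec : Claim_equal_doubly_regular := by
  intro n QR_set _
  unfold Spec_doubly_regular doubly_regular doubly_regular_alt
  by_cases hn : n ≤ 0
  · simp [hn, PySem.List.pyRange_one_eq_nil hn]
  · replace hn : 0 < n := by omega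
    rw [if_neg (by omega)]
    rw [PySem.List.foldl_congr_mem (g := fun a i => a.modify i.toNat (fun row =>
      QR_set.foldl (fun r d =>
        let j := PySem.Int.mod (i + d) n
        if j ≠ i then PySem.List.pySetD r j 1 else r) row))
      (h := fun adj i hi => pv_innerFold_eq_modify n i
        ((PySem.List.mem_pyRange_one.mp hi).1) QR_set adj)]
    apply List.ext_getElem?
    intro k
    rw [pv_outerFold_getElem? _ _ (PySem.List.nodup_pyRange_one 0 n)
      (fun x hx => (PySem.List.mem_pyRange_one.mp hx).1)]
    rw [List.getElem?_map, List.getElem?_map, PySem.List.getElem?_pyRange_one]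
    by_cases hk : k < (n - 0).toNat
    · rw [if_pos hk]
      have hmem : ((k : Int)) ∈ PySem.List.pyRange 0 n 1 := by
        rw [PySem.List.mem_pyRange_one]; omega
      rw [if_pos hmem]
      simp only [Option.map_some, zero_add]
      rw [pv_row_eq n (k : Int) hn QR_set]
    · rw [if_neg hk]
      have hmem : ¬ ((k : Int)) ∈ PySem.List.pyRange 0 n 1 := by
        rw [PySem.List.mem_pyRange_one]; omega
      rw [if_neg hmem]
      simp
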